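-- pv_equiv track=rewrite | github.com/JordanFan860406/Self-Attention-Based-Medical-Speech-Recognition | evaluation/cer_ker_ser.py | sep_seq
-- ===== SOURCE A (Python) =====
-- def sep_seq(seq):
--     """
--     return a list of sentence
--     e.g. "Ada{asd}qe{qs}a" -> [A,s,a,{asd},q,e,{qs},a]
--
--     :param seq: input sentence
--     :return: list of sentence
--     """
--     temp = []
--     is_eng_word = False
--     word_temp = ""
--     for c in seq:
--         word_temp = word_temp + c
--         if c == "{" or c == "}":
--             is_eng_word = not is_eng_word
--             if not is_eng_word:
--                 temp.append(word_temp)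
--                 word_temp = ""
--         elif not is_eng_word:
--             temp.append(word_temp)
--             word_temp = ""
--     return temp
-- ===== SOURCE B (Python) =====
-- def sep_seq(seq):
--     res = []
--     i = 0
--     n = len(seq)
--     while i < n:
--         if seq[i] in "{}":
--             j = i + 1
--             while j < n and seq[j] not in "{}":
--                 j += 1
--             if j < n:
--                 res.append(seq[i:j + 1])
--                 i = j + 1
--             else:
--                 break
--         else:
--             res.append(seq[i])
--             i += 1
--     return res
-- ===== Notes on version B (the rewrite author's own statement) =====
-- stated objective: alternative
-- what changed: Replaces the per-char toggle flag and running string accumulator with an index-free two-pointer style scan: structural recursion that, on a brace, scans forward for the next brace and emits the whole slice at once (dropping an unterminated tail), otherwise emits the single char.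
import Mathlib
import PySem

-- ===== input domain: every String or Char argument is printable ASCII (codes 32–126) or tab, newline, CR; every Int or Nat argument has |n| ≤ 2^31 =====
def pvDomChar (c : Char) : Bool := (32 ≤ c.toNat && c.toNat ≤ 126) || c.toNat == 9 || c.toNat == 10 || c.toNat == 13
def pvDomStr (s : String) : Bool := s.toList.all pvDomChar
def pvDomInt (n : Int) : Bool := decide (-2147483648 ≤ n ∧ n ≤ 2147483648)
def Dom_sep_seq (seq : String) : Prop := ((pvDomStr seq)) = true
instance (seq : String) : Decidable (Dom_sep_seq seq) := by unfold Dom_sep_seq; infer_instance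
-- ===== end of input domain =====

-- B replaces A's per-char toggle flag and running string accumulator with a two-pointer scan
-- that, at a brace, jumps forward to the next brace and emits the whole token at once (alternative decomposition, same cost).


-- ===== PORT A =====
-- state = (temp, is_eng_word, word_temp); word_temp kept as List Char (Python string concatenation = list append)
def stepA (st : List String × Bool × List Char) (c : Char) : List String × Bool × List Char :=
  let wt := st.2.2 ++ [c]
  if c = '{' ∨ c = '}' then
    let flag := !st.2.1
    if flag = false then (st.1 ++ [String.ofList wt], flag, [])
    else (st.1, flag, wt)
  else
    if st.2.1 = false then (st.1 ++ [String.ofList wt], st.2.1, [])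
    else (st.1, st.2.1, wt)

def sep_seq (seq : String) : List String :=
  (seq.toList.foldl stepA ([], false, [])).1

-- ===== PORT B =====
def isBrace (c : Char) : Bool := c == '{' || c == '}'

-- inner while-loop: scan forward to the next brace; returns (chars up to AND including it, rest), none if no brace
def scanBrace : List Char → Option (List Char × List Char)
  | [] => none
  | c :: rest =>
    if isBrace c then some ([c], rest)
    else (scanBrace rest).map (fun pr => (c :: pr.1, pr.2))

theorem scanBrace_len : ∀ (xs p r : List Char), scanBrace xs = some (p, r) → r.length < xs.length := by
  intro xs
  induction xs with
  | nil => intro p r h; simp [scanBrace] at h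
  | cons c rest ih =>
    intro p r h
    simp only [scanBrace] at h
    split at h
    · simp only [Option.some.injEq, Prod.mk.injEq] at h
      obtain ⟨h1, h2⟩ := h
      simp [← h2]
    · cases hsb : scanBrace rest with
      | none => rw [hsb] at h; simp at h
      | some pr =>
        rw [hsb] at h
        simp at h
        have := ih pr.1 pr.2 (by rw [hsb])
        simp [← h.2]
        omega

def altGo : List Char → List String
  | [] => []
  | c :: rest =>
    if isBrace c then
      match h : scanBrace rest with
      | none => []
      | some (p, r) => String.ofList (c :: p) :: altGo r
    else String.ofList [c] :: altGo rest
  termination_by xs => xs.length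
  decreasing_by
  · exact Nat.lt_succ_of_lt (scanBrace_len rest p r h)
  · simp

def sep_seq_alt (seq : String) : List String := altGo seq.toList

-- ===== PRECONDITION & SPEC =====
def Spec_sep_seq (seq : String) (out : List String) : Prop := out = sep_seq_alt seq
instance (seq : String) (out : List String) : Decidable (Spec_sep_seq seq out) := by unfold Spec_sep_seq; infer_instance

-- ===== CLAIM (what is proved, stated in full; the proofs are below) =====
def Claim_equal_sep_seq : Prop := ∀ (seq : String), Dom_sep_seq seq → Spec_sep_seq seq (sep_seq seq)

-- ===== LEMMAS AND PROOFS =====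
theorem loop_spec : ∀ (xs : List Char),
    (∀ (acc : List String) (wt : List Char),
       (xs.foldl stepA (acc, true, wt)).1 =
         (match scanBrace xs with
          | none => acc
          | some (p, r) => acc ++ (String.ofList (wt ++ p) :: altGo r)))
  ∧ (∀ (acc : List String), (xs.foldl stepA (acc, false, [])).1 = acc ++ altGo xs) := by
  intro xs
  induction xs with
  | nil =>
    constructor
    · intro acc wt; simp [scanBrace]
    · intro acc; simp [altGo]
  | cons c rest ih =>
    have hbr : ∀ (b : Bool), isBrace c = b → ((c = '{' ∨ c = '}') ↔ b = true) := by
      intro b hb; subst hb; simp [isBrace]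
    constructor
    · intro acc wt
      cases hb : isBrace c with
      | true =>
        have hp : c = '{' ∨ c = '}' := ((hbr true hb).mpr rfl)
        simp only [List.foldl, stepA, if_pos hp, Bool.not_true]
        simp only [scanBrace, hb]
        
        simpa using ih.2 (acc ++ [String.ofList (wt ++ [c])])
      | false =>
        have hp : ¬ (c = '{' ∨ c = '}') := by simp [(hbr false hb)]
        simp only [List.foldl, stepA, if_neg hp]
        rw [if_neg (by simp)]
        rw [ih.1 acc (wt ++ [c])]
        simp only [scanBrace, hb, Bool.false_eq_true, if_false]
        cases hsb : scanBrace rest with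
        | none => simp
        | some pr => cases pr with
          | mk p r => simp
    · intro acc
      cases hb : isBrace c with
      | true =>
        have hp : c = '{' ∨ c = '}' := ((hbr true hb).mpr rfl)
        simp only [List.foldl, stepA, if_pos hp, Bool.not_false]
        rw [if_neg (by simp)]
        simp only [List.nil_append]
        rw [ih.1 acc [c]]
        rw [altGo]
        simp only [hb]
        cases hsb : scanBrace rest with
        | none => simp
        | some pr => cases pr with
          | mk p r => simp
      | false =>
        have hp : ¬ (c = '{' ∨ c = '}') := by simp [(hbr false hb)]
        simp only [List.foldl, stepA, if_neg hp]
        rw [if_pos trivial]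
        simp only [List.nil_append]
        rw [ih.2 (acc ++ [String.ofList [c]])]
        rw [altGo]
        simp [hb]

-- ===== VERDICT (by name: the statement is the Claim_ definition above) =====
theorem sep_seq_spec : Claim_equal_sep_seq := by
  intro seq _
  unfold Spec_sep_seq sep_seq sep_seq_alt
  simpa using (loop_spec seq.toList).2 []
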